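-- pv_equiv track=rewrite | github.com/HanliFu/CSCB20-Web-page-design | Question1.py | covertString
-- ===== SOURCE A (Python) =====
-- def covertString(name):
--     res = ''
--
--     containsDigits = False
--     for char in name:
--         if char.isdigit():
--             containsDigits=True
--
--     if(containsDigits):
--         for char in name:
--             if char.isalpha():
--                 res += char
--     else:
--         for char in name:
--             if char.isalpha():
--                 if char.islower():
--                     res += char.upper()
--                 elif char.isupper():
--                     res += char.lower()
--     return res
-- ===== SOURCE B (Python) =====
-- def covertString(name):
--     containsDigits = False
--     kept = []
--     swapped = []
--     for char in name:
--         if char.isdigit():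
--             containsDigits = True
--         if char.isalpha():
--             kept.append(char)
--         if char.islower():
--             swapped.append(char.upper())
--         elif char.isupper():
--             swapped.append(char.lower())
--     return ''.join(kept if containsDigits else swapped)
-- ===== Notes on version B (the rewrite author's own statement) =====
-- stated objective: alternative
-- what changed: A's three separate passes over the string (digit scan, then one of two filtering passes) are folded into one single pass that carries a digit flag and two accumulators (kept letters and case-swapped letters), choosing between them at the end.
import Mathlib
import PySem

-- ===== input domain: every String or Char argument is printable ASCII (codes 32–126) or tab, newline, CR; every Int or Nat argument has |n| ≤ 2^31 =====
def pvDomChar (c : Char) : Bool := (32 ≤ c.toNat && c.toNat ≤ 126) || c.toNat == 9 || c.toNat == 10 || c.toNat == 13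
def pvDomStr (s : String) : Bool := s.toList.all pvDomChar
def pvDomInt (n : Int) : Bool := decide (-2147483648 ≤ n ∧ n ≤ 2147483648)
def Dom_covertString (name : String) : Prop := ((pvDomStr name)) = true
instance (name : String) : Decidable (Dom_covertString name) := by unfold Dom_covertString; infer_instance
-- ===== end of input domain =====

-- B folds A's three passes into one single pass carrying a digit flag and two accumulators; same result.

-- ===== PORT A =====
def covertString (name : String) : String :=
  let cs := name.toList
  let containsDigits := cs.foldl (fun b c => if PySem.Chars.isdigit c then true else b) false
  let res : List Char :=
    if containsDigits then
      cs.foldl (fun r c => if PySem.Chars.isalpha c then r ++ [c] else r) []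
    else
      cs.foldl (fun r c =>
        if PySem.Chars.isalpha c then
          if PySem.Chars.islower c then r ++ [PySem.Chars.upperChar c]
          else if PySem.Chars.isupper c then r ++ [PySem.Chars.lowerChar c]
          else r
        else r) []
  String.mk res

-- ===== PORT B =====
def covertString_alt (name : String) : String :=
  let st := name.toList.foldl (fun (st : Bool × List Char × List Char) c =>
      let d := if PySem.Chars.isdigit c then true else st.1
      let kept := if PySem.Chars.isalpha c then st.2.1 ++ [c] else st.2.1
      let swapped :=
        if PySem.Chars.islower c then st.2.2 ++ [PySem.Chars.upperChar c]
        else if PySem.Chars.isupper c then st.2.2 ++ [PySem.Chars.lowerChar c]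
        else st.2.2
      (d, kept, swapped))
    (false, [], [])
  String.mk (if st.1 then st.2.1 else st.2.2)

-- ===== PRECONDITION & SPEC =====
def Spec_covertString (name : String) (out : String) : Prop := out = covertString_alt name
instance (name : String) (out : String) : Decidable (Spec_covertString name out) := by unfold Spec_covertString; infer_instance

-- ===== CLAIM (what is proved, stated in full; the proofs are below) =====
def Claim_equal_covertString : Prop := ∀ (name : String), Dom_covertString name → Spec_covertString name (covertString name)

-- ===== LEMMAS AND PROOFS =====
-- The single fold over the triple computes A's three folds componentwise.
theorem pv_tri (cs : List Char) (d : Bool) (k s : List Char) :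
    cs.foldl (fun (st : Bool × List Char × List Char) c =>
      (if PySem.Chars.isdigit c then true else st.1,
       if PySem.Chars.isalpha c then st.2.1 ++ [c] else st.2.1,
       if PySem.Chars.islower c then st.2.2 ++ [PySem.Chars.upperChar c]
       else if PySem.Chars.isupper c then st.2.2 ++ [PySem.Chars.lowerChar c]
       else st.2.2)) (d, k, s)
    = (cs.foldl (fun b c => if PySem.Chars.isdigit c then true else b) d,
       cs.foldl (fun r c => if PySem.Chars.isalpha c then r ++ [c] else r) k,
       cs.foldl (fun r c =>
         if PySem.Chars.isalpha c then
           if PySem.Chars.islower c then r ++ [PySem.Chars.upperChar c]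
           else if PySem.Chars.isupper c then r ++ [PySem.Chars.lowerChar c]
           else r
         else r) s) := by
  induction cs generalizing d k s with
  | nil => rfl
  | cons c cs ih =>
      simp only [List.foldl_cons, ih]
      congr 2
      by_cases hl : PySem.Chars.islower c
      · simp [PySem.Chars.isalpha, hl]
      · by_cases hu : PySem.Chars.isupper c <;> simp [PySem.Chars.isalpha, hl, hu]

-- ===== VERDICT (by name: the statement is the Claim_ definition above) =====
theorem covertString_spec : Claim_equal_covertString := by
  intro name _
  show covertString name = covertString_alt name
  simp only [covertString, covertString_alt, pv_tri]
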